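-- pv_equiv track=rewrite | github.com/SeongjinLee00/Baekjoon | 프로그래머스/lv0/120882. 등수 매기기/등수 매기기.py | solution
-- ===== SOURCE A (Python) =====
-- def solution(score):
--     ref1=[]
--     ret=[0]*len(score)
--     for a,b in score:
--         ref1.append(a+b)
--
--     ref1.sort(reverse=True)
--
--     rank=dict()
--
--     cnt=1
--
--     for val in ref1:
--         if val in rank:
--             cnt+=1
--             continue
--         else:
--             rank[val]=cnt
--             cnt+=1
--
--     for idx,val in enumerate(score):
--         ret[idx]=rank[sum(val)]
--
--     return ret
-- ===== SOURCE B (Python) =====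
-- def solution(score):
--     sums = [a + b for a, b in score]
--     return [1 + sum(1 for t in sums if t > s) for s in sums]
-- ===== Notes on version B (the rewrite author's own statement) =====
-- stated objective: simpler
-- what changed: Replaces sort + rank-dictionary construction + indexed writes into a preallocated list with a direct two-line nested count: each student's rank is 1 plus the number of strictly greater sums.
import Mathlib
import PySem

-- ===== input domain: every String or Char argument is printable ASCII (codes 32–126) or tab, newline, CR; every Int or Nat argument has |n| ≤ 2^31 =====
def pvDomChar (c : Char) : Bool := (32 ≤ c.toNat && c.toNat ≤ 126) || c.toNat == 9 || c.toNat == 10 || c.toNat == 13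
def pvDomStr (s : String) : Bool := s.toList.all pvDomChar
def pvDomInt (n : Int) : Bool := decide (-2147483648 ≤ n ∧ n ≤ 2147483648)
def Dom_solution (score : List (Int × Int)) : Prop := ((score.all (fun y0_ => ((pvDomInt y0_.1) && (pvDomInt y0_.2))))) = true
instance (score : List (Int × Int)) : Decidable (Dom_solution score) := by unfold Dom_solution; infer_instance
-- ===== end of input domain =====

-- B replaces A's sort + rank-dictionary + indexed writes with a direct nested count of
-- strictly greater sums (simpler; not faster).


-- ===== PORT A =====
-- literal port of A: build ref1 by appends, sort it descending, build the rank dict with a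
-- running counter, then write rank[sum(val)] into the preallocated ret at each index.
-- rank[sum(val)] is ported as getD _ 0: the key is always present (sum(val) ∈ ref1), so the
-- default is never used and Python's A never raises.
def solution (score : List (Int × Int)) : List Int :=
  let ref1 := score.foldl (fun acc p => acc ++ [p.1 + p.2]) []
  let ref1s := PySem.List.sorted ref1 (fun x => x) true
  let rc := ref1s.foldl
      (fun (s : PySem.Dict Int Int × Int) val =>
        if s.1.contains val then (s.1, s.2 + 1) else (s.1.insert val s.2, s.2 + 1))
      (PySem.Dict.empty, 1)
  (PySem.List.enumerate score 0).foldl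
      (fun ret p => PySem.List.pySetD ret p.1 (rc.1.getD (p.2.1 + p.2.2) 0))
      (List.replicate score.length (0 : Int))

-- ===== PORT B =====
def solution_alt (score : List (Int × Int)) : List Int :=
  let sums := score.map (fun p => p.1 + p.2)
  sums.map (fun s => 1 + (sums.countP (fun t => s < t) : Int))

-- ===== PRECONDITION & SPEC =====
def Spec_solution (score : List (Int × Int)) (out : List Int) : Prop := out = solution_alt score
instance (score : List (Int × Int)) (out : List Int) : Decidable (Spec_solution score out) := by unfold Spec_solution; infer_instance

-- ===== CLAIM (what is proved, stated in full; the proofs are below) =====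
def Claim_equal_solution : Prop := ∀ (score : List (Int × Int)), Dom_solution score → Spec_solution score (solution score)

-- ===== LEMMAS AND PROOFS =====

-- A's rank loop never overwrites an existing entry.
theorem rank_preserve (l : List Int) : ∀ (d : PySem.Dict Int Int) (c v x : Int),
    d.get? v = some x →
    ((l.foldl
        (fun (s : PySem.Dict Int Int × Int) val =>
          if s.1.contains val then (s.1, s.2 + 1) else (s.1.insert val s.2, s.2 + 1))
        (d, c)).1).get? v = some x := by
  induction l with
  | nil => intro d c v x h; simpa using h
  | cons a l ih =>
    intro d c v x h
    simp only [List.foldl_cons]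
    by_cases hc : d.contains a = true
    · simp only [hc, if_true]; exact ih d (c + 1) v x h
    · rw [Bool.not_eq_true] at hc
      simp only [hc, Bool.false_eq_true, if_false]
      apply ih
      by_cases hv : v = a
      · exfalso
        rw [PySem.Dict.contains_eq_isSome_get?] at hc
        rw [hv] at h
        simp [h] at hc
      · rw [PySem.Dict.get?_insert_of_ne _ _ hv]; exact h

-- On a descending list, A's rank loop assigns v the counter value at v's first occurrence,
-- i.e. c + (number of elements strictly greater than v).
theorem rank_main (l : List Int) : ∀ (d : PySem.Dict Int Int) (c v : Int),
    l.Pairwise (fun a b => b ≤ a) → v ∈ l → d.get? v = none →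
    ((l.foldl
        (fun (s : PySem.Dict Int Int × Int) val =>
          if s.1.contains val then (s.1, s.2 + 1) else (s.1.insert val s.2, s.2 + 1))
        (d, c)).1).get? v = some (c + (l.countP (fun t => v < t) : Int)) := by
  induction l with
  | nil => intro d c v _ hv; simp at hv
  | cons a l ih =>
    intro d c v hp hv hd
    have ha : ∀ x ∈ l, x ≤ a := (List.pairwise_cons.mp hp).1
    have hpl : l.Pairwise (fun a b => b ≤ a) := (List.pairwise_cons.mp hp).2
    simp only [List.foldl_cons]
    by_cases hva : v = a
    · subst hva
      have hc : d.contains v = false := by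
        rw [PySem.Dict.contains_eq_isSome_get?, hd]; rfl
      simp only [hc, Bool.false_eq_true, if_false]
      have hcount : (v :: l).countP (fun t => v < t) = 0 := by
        simp only [List.countP_eq_zero]
        intro x hx
        rcases List.mem_cons.mp hx with hx | hx
        · simp [hx]
        · simpa using not_lt.mpr (ha x hx)
      rw [hcount]
      have := rank_preserve l (d.insert v c) (c + 1) v c (PySem.Dict.get?_insert_self d v c)
      simpa using this
    · have hvl : v ∈ l := by
        rcases List.mem_cons.mp hv with h | h
        · exact absurd h hva
        · exact h
      have hlt : v < a := lt_of_le_of_ne (ha v hvl) hva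
      have hstep : ((a :: l).countP (fun t => v < t) : Int)
          = 1 + (l.countP (fun t => v < t) : Int) := by
        simp [hlt]; ring
      by_cases hc : d.contains a = true
      · simp only [hc, if_true]
        rw [ih d (c + 1) v hpl hvl hd, hstep]
        ring_nf
      · rw [Bool.not_eq_true] at hc
        simp only [hc, Bool.false_eq_true, if_false]
        have hd' : (d.insert a c).get? v = none := by
          rw [PySem.Dict.get?_insert_of_ne _ _ hva]; exact hd
        rw [ih (d.insert a c) (c + 1) v hpl hvl hd', hstep]
        ring_nf

-- A's last loop (indexed writes into a preallocated list) builds a map.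
theorem setloop (f : Int × Int → Int) (xs : List (Int × Int)) : ∀ (s : Nat) (ret : List Int),
    ret.length = s + xs.length →
    (PySem.List.enumerate xs (s : Int)).foldl
        (fun ret p => PySem.List.pySetD ret p.1 (f p.2)) ret
      = ret.take s ++ xs.map f := by
  induction xs with
  | nil =>
    intro s ret hlen
    simp only [List.length_nil, Nat.add_zero] at hlen
    simp [PySem.List.enumerate, List.take_of_length_le (le_of_eq hlen)]
  | cons x xs ih =>
    intro s ret hlen
    rw [PySem.List.enumerate_cons, List.foldl_cons]
    have hs : s < ret.length := by simp only [hlen, List.length_cons]; omega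
    have hcast : (s : Int) + 1 = ((s + 1 : Nat) : Int) := by push_cast; ring
    rw [hcast]
    have hset : PySem.List.pySetD ret (s : Int) (f x) = ret.set s (f x) :=
      PySem.List.pySetD_natCast ret s (f x)
    rw [hset, ih (s + 1) (ret.set s (f x)) (by simp only [List.length_set, hlen, List.length_cons]; omega)]
    rw [List.set_eq_take_append_cons_drop, if_pos hs]
    have hts : (ret.take s).length = s := List.length_take_of_le hs.le
    have htake : (ret.take s ++ f x :: ret.drop (s + 1)).take (s + 1)
        = ret.take s ++ [f x] := by
      rw [show s + 1 = (ret.take s).length + 1 by rw [hts], List.take_append]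
      simp
    rw [htake]
    simp

theorem solution_eq (score : List (Int × Int)) : solution score = solution_alt score := by
  unfold solution solution_alt
  simp only [PySem.List.foldl_append_singleton_eq_map, List.nil_append]
  set sums := score.map (fun p : Int × Int => p.1 + p.2) with hsums
  set ss := PySem.List.sorted sums (fun x => x) true with hss
  set rc := ss.foldl
      (fun (s : PySem.Dict Int Int × Int) val =>
        if s.1.contains val then (s.1, s.2 + 1) else (s.1.insert val s.2, s.2 + 1))
      (PySem.Dict.empty, 1) with hrc
  rw [show (PySem.List.enumerate score : List (Int × (Int × Int)))
        = PySem.List.enumerate score ((0 : Nat) : Int) from rfl]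
  rw [setloop (fun q => rc.1.getD (q.1 + q.2) 0) score 0
      (List.replicate score.length (0 : Int)) (by simp)]
  simp only [List.take_zero, List.nil_append, List.map_map, hsums]
  apply List.map_congr_left
  intro p hp
  have hmem : p.1 + p.2 ∈ ss := by
    rw [hss, PySem.List.mem_sorted]
    exact List.mem_map.mpr ⟨p, hp, rfl⟩
  have hpair : ss.Pairwise (fun a b => b ≤ a) := by
    simpa using PySem.List.sorted_pairwise_rev (xs := sums) (key := fun x => x)
  have hget := rank_main ss PySem.Dict.empty 1 (p.1 + p.2) hpair hmem
      (PySem.Dict.get?_empty _)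
  have hperm : ss.Perm sums := PySem.List.sorted_perm sums (fun x => x) true
  have hcnt : ss.countP (fun t => p.1 + p.2 < t) = sums.countP (fun t => p.1 + p.2 < t) :=
    hperm.countP_eq _
  rw [← hrc] at hget
  simp only [Function.comp]
  rw [PySem.Dict.getD_eq_get?_getD, hget, hcnt]
  simp [hsums, List.countP_map]

-- ===== VERDICT (by name: the statement is the Claim_ definition above) =====
theorem solution_spec : Claim_equal_solution := by
  intro score _
  unfold Spec_solution
  exact solution_eq score
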